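-- pv_equiv track=rewrite | github.com/EdwardG5/tempCrossword | preprocessWordList.py | listToPatternDict2
-- ===== SOURCE A (Python) =====
-- import itertools
--
-- def extractAllPatterns(word, length):
-- 	# Explode into chars
-- 	l = list(word)
-- 	# Create options list
-- 	for x in range(length):
-- 		l[x] = [l[x], '-']
-- 	# Create patterns
-- 	patterns = list(itertools.product(*l))
-- 	# Simplify to strings
-- 	length = len(patterns)
-- 	for x in range(length):
-- 		patterns[x] = "".join(patterns[x])
-- 	# Return
-- 	return patterns
--
-- def listToPatternDict2(wordList):
-- 	mDict = dict()
-- 	for word in wordList: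
-- 		patterns = extractAllPatterns(word, len(word))
-- 		for p in patterns:
-- 			if p in mDict:
-- 					mDict[p] += 1
-- 			else:
-- 					mDict[p] = 1
-- 	return mDict
-- ===== SOURCE B (Python) =====
-- def _maskPatterns(word):
--     # all 2**len(word) dash-masked variants of word, indexed by the bits of m
--     # (high bit = first character), built back-to-front from the low bits of m
--     n = len(word)
--     res = []
--     for m in range(2 ** n):
--         p = ""
--         mm = m
--         for ch in reversed(word):
--             p = ('-' if mm % 2 else ch) + p
--             mm //= 2
--         res.append(p)
--     return res
--
--
-- def listToPatternDict2(wordList):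
--     counts = {}
--     for word in wordList:
--         # meet in the middle: enumerate the two halves' masks separately and
--         # concatenate, so each of the 2**len(word) patterns is one string add
--         half = len(word) // 2
--         left = _maskPatterns(word[:half])
--         right = _maskPatterns(word[half:])
--         for l in left:
--             for r in right:
--                 p = l + r
--                 counts[p] = counts.get(p, 0) + 1
--     return counts
-- ===== Notes on version B (the rewrite author's own statement) =====
-- stated objective: alternative
-- what changed: Replaces the itertools.product enumeration of per-position [char,'-'] option lists (materialising all tuples, then joining each) with a meet-in-the-middle bitmask scheme: the dash masks of each half of the word are enumerated from the bits of an integer counter, and every full pattern is one concatenation of a left and a right half-pattern, counted via dict.get.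
import Mathlib
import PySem

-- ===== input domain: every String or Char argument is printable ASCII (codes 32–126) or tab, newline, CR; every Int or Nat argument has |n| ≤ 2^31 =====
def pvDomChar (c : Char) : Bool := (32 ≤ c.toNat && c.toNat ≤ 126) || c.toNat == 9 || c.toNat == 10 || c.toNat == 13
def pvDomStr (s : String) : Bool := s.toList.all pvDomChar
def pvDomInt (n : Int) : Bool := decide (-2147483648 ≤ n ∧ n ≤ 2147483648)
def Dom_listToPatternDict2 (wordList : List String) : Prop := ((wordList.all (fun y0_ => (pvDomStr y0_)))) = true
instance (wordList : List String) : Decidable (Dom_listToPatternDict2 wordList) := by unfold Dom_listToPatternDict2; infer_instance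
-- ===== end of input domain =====

-- B replaces the itertools.product enumeration of per-position [char,'-'] option lists by a
-- meet-in-the-middle bitmask scheme: the dash masks of each half of the word are enumerated
-- from the bits of an integer counter and every full pattern is one concatenation of a left
-- and a right half-pattern; alternative decomposition.

-- ===== PORT A =====
-- itertools.product over a list of factor lists (exact: leftmost factor varies slowest,
-- rightmost fastest — Python's tuple order)
def pvProduct {α : Type} : List (List α) → List (List α)
  | [] => [[]]
  | opts :: rest => opts.flatMap (fun c => (pvProduct rest).map (fun t => c :: t))

-- A's only call site passes length = len(word): the 'for x in range(length): l[x] = [l[x], "-"]'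
-- loop then replaces EVERY element (the mixed-type intermediate list is untypeable in Lean, so it
-- is ported as the map it performs); the final string-conversion loop is the map of "".join.
def extractAllPatterns (word : String) (length : Int) : List String :=
  let l := word.toList
  let opts := l.map (fun c => ([c, '-'] : List Char))
  let patterns := pvProduct opts
  patterns.map (fun t => String.ofList t)

def listToPatternDict2 (wordList : List String) : List (String × Int) :=
  (wordList.foldl (fun mDict word =>
      (extractAllPatterns word (PySem.Str.len word)).foldl (fun mDict p =>
        if mDict.contains p then mDict.modify p 0 (· + 1) else mDict.insert p 1) mDict)
    PySem.Dict.empty).items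

-- ===== PORT B =====
-- one step of _maskPatterns's inner 'for ch in reversed(word)' loop: state = (p, mm)
def pvMaskStep (st : List Char × Int) (ch : Char) : List Char × Int :=
  ((if PySem.Int.mod st.2 2 ≠ 0 then '-' else ch) :: st.1, PySem.Int.floordiv st.2 2)

def pvMaskPattern (word : List Char) (m : Int) : List Char :=
  (word.reverse.foldl pvMaskStep ([], m)).1

-- _maskPatterns: 2 ** n with n = len(word) ≥ 0, so the Nat exponent (len).toNat is exact
def pvMaskPatterns (word : String) : List String :=
  (PySem.List.pyRange 0 ((2 : Int) ^ (PySem.Str.len word).toNat) 1).foldl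
    (fun res m => res ++ [String.ofList (pvMaskPattern word.toList m)]) []

def listToPatternDict2_alt (wordList : List String) : List (String × Int) :=
  (wordList.foldl (fun counts word =>
      let half := PySem.Int.floordiv (PySem.Str.len word) 2
      let left := pvMaskPatterns (PySem.Str.slice word none (some half))
      let right := pvMaskPatterns (PySem.Str.slice word (some half) none)
      left.foldl (fun counts l =>
        right.foldl (fun counts r =>
          let p := l ++ r
          counts.insert p (counts.getD p 0 + 1)) counts) counts)
    PySem.Dict.empty).items

-- ===== PRECONDITION & SPEC =====
def Spec_listToPatternDict2 (wordList : List String) (out : List (String × Int)) : Prop := out = listToPatternDict2_alt wordList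
instance (wordList : List String) (out : List (String × Int)) : Decidable (Spec_listToPatternDict2 wordList out) := by unfold Spec_listToPatternDict2; infer_instance

-- ===== CLAIM (what is proved, stated in full; the proofs are below) =====
def Claim_equal_listToPatternDict2 : Prop := ∀ (wordList : List String), Dom_listToPatternDict2 wordList → Spec_listToPatternDict2 wordList (listToPatternDict2 wordList)

-- ===== LEMMAS AND PROOFS =====

-- the state of B's inner loop, as a function of the (sub)word still to be processed
def pvS (w : List Char) (m : Int) : List Char × Int := w.reverse.foldl pvMaskStep ([], m)

theorem pvS_nil (m : Int) : pvS [] m = ([], m) := rfl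

theorem pvS_cons (c : Char) (w : List Char) (m : Int) :
    pvS (c :: w) m = pvMaskStep (pvS w m) c := by
  simp [pvS, List.foldl_append]

theorem pvS_snd (w : List Char) (k : Nat) :
    (pvS w (k : Int)).2 = ((k / 2 ^ w.length : Nat) : Int) := by
  induction w generalizing k with
  | nil => simp [pvS_nil]
  | cons c rest ih =>
    rw [pvS_cons, pvMaskStep]
    simp only [ih]
    rw [show PySem.Int.floordiv ((k / 2 ^ rest.length : Nat) : Int) 2
          = (((k / 2 ^ rest.length) / 2 : Nat) : Int) by
      exact_mod_cast PySem.Int.floordiv_natCast (k / 2 ^ rest.length) 2]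
    rw [Nat.div_div_eq_div_mul]
    simp [pow_succ]

theorem pvS_fst_add (w : List Char) (k j : Nat) :
    (pvS w ((k + 2 ^ w.length * j : Nat) : Int)).1 = (pvS w (k : Int)).1 := by
  induction w generalizing k j with
  | nil => simp [pvS_nil]
  | cons c rest ih =>
    have hrw : k + 2 ^ (c :: rest).length * j = k + 2 ^ rest.length * (2 * j) := by
      simp [pow_succ]; ring
    rw [hrw, pvS_cons, pvS_cons, pvMaskStep, pvMaskStep]
    simp only []
    rw [ih k (2 * j), pvS_snd, pvS_snd]
    have hdiv : (k + 2 ^ rest.length * (2 * j)) / 2 ^ rest.length = k / 2 ^ rest.length + 2 * j :=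
      Nat.add_mul_div_left k (2 * j) (Nat.two_pow_pos rest.length)
    rw [hdiv]
    have hmod : PySem.Int.mod ((k / 2 ^ rest.length + 2 * j : Nat) : Int) 2
        = PySem.Int.mod ((k / 2 ^ rest.length : Nat) : Int) 2 := by
      rw [show PySem.Int.mod ((k / 2 ^ rest.length + 2 * j : Nat) : Int) 2
            = (((k / 2 ^ rest.length + 2 * j) % 2 : Nat) : Int) by
        exact_mod_cast PySem.Int.mod_natCast (k / 2 ^ rest.length + 2 * j) 2]
      rw [show PySem.Int.mod ((k / 2 ^ rest.length : Nat) : Int) 2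
            = (((k / 2 ^ rest.length) % 2 : Nat) : Int) by
        exact_mod_cast PySem.Int.mod_natCast (k / 2 ^ rest.length) 2]
      congr 1
      omega
    rw [hmod]

-- A's per-word pattern list, indexed by B's masks
theorem pvKey (w : List Char) :
    pvProduct (w.map (fun c => ([c, '-'] : List Char)))
      = (List.range (2 ^ w.length)).map (fun (k : Nat) => (pvS w (k : Int)).1) := by
  induction w with
  | nil => simp [pvProduct, pvS_nil]
  | cons c rest ih =>
    have hp : 2 ^ (c :: rest).length = 2 ^ rest.length + 2 ^ rest.length := by
      simp [pow_succ]; ring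
    rw [List.map_cons, pvProduct, ih, hp, List.range_add]
    simp only [List.flatMap_cons, List.flatMap_nil, List.map_map, List.append_nil, List.map_append]
    congr 1
    · apply List.map_congr_left
      intro k hk
      rw [List.mem_range] at hk
      simp only [Function.comp_apply]
      rw [pvS_cons, pvMaskStep]
      have h2 : (pvS rest (k : Int)).2 = ((k / 2 ^ rest.length : Nat) : Int) := pvS_snd rest k
      have hk0 : k / 2 ^ rest.length = 0 := Nat.div_eq_of_lt hk
      simp [h2, hk0, PySem.Int.mod]
    · apply List.map_congr_left
      intro k hk
      rw [List.mem_range] at hk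
      simp only [Function.comp_apply]
      rw [pvS_cons, pvMaskStep]
      rw [show ((2 ^ rest.length + k : Nat) : Int) = ((k + 2 ^ rest.length * 1 : Nat) : Int) by
        push_cast; ring]
      rw [pvS_fst_add rest k 1, pvS_snd]
      have hdiv : (k + 2 ^ rest.length * 1) / 2 ^ rest.length = k / 2 ^ rest.length + 1 :=
        Nat.add_mul_div_left k 1 (Nat.two_pow_pos rest.length)
      have hk0 : k / 2 ^ rest.length = 0 := Nat.div_eq_of_lt hk
      rw [hdiv, hk0]
      simp [PySem.Int.mod]

-- A's dict-update step equals B's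
theorem pvStep_eq (d : PySem.Dict String Int) (p : String) :
    (if d.contains p then d.modify p 0 (· + 1) else d.insert p 1)
      = d.insert p (d.getD p 0 + 1) := by
  by_cases h : d.contains p = true
  · simp [h, PySem.Dict.modify]
  · have hn : d.get? p = none := by
      rw [PySem.Dict.get?_eq_none_iff_contains]
      simpa using h
    have h0 : d.getD p 0 = 0 := by rw [PySem.Dict.getD_eq_get?_getD, hn]; rfl
    simp [h, h0]

-- _maskPatterns s lists the masked variants of s in mask order
theorem pvMaskPatterns_eq (s : String) :
    pvMaskPatterns s
      = (List.range (2 ^ s.toList.length)).map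
          (fun (k : Nat) => String.ofList (pvS s.toList (k : Int)).1) := by
  unfold pvMaskPatterns
  have hlen : (PySem.Str.len s).toNat = s.toList.length := by
    simp [PySem.Str.len_eq]
  rw [PySem.List.pyRange_one]
  have hb : (((2 : Int) ^ (PySem.Str.len s).toNat - 0).toNat) = 2 ^ s.toList.length := by
    rw [hlen, sub_zero, show ((2 : Int) ^ s.toList.length) = ((2 ^ s.toList.length : Nat) : Int)
      by push_cast; ring]
    exact Int.toNat_natCast _
  rw [hb]
  rw [PySem.List.foldl_append_singleton_eq_map (fun m => String.ofList (pvMaskPattern s.toList m))]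
  rw [List.map_map]
  apply List.map_congr_left
  intro k _
  simp [pvMaskPattern, pvS]

-- the inner loop only conses onto the accumulated pattern: pull the accumulator out
theorem pvFold_acc (l : List Char) (acc : List Char) (m : Int) :
    l.foldl pvMaskStep (acc, m)
      = ((l.foldl pvMaskStep ([], m)).1 ++ acc, (l.foldl pvMaskStep ([], m)).2) := by
  induction l generalizing acc m with
  | nil => simp
  | cons c l ih =>
    simp only [List.foldl_cons]
    rw [show pvMaskStep (acc, m) c
          = (((if PySem.Int.mod m 2 ≠ 0 then '-' else c) :: acc), PySem.Int.floordiv m 2) from rfl]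
    rw [show pvMaskStep (([] : List Char), m) c
          = ([(if PySem.Int.mod m 2 ≠ 0 then '-' else c)], PySem.Int.floordiv m 2) from rfl]
    rw [ih, ih [(if PySem.Int.mod m 2 ≠ 0 then '-' else c)] (PySem.Int.floordiv m 2)]
    simp

-- B's loop state on a concatenation: the right part consumes the low bits first
theorem pvS_append (u v : List Char) (m : Int) :
    pvS (u ++ v) m = ((pvS u (pvS v m).2).1 ++ (pvS v m).1, (pvS u (pvS v m).2).2) := by
  unfold pvS
  rw [List.reverse_append, List.foldl_append]
  rw [show (v.reverse.foldl pvMaskStep ([], m))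
        = ((v.reverse.foldl pvMaskStep ([], m)).1, (v.reverse.foldl pvMaskStep ([], m)).2) from rfl]
  rw [pvFold_acc]

-- List.range of a product, factored (used to split the mask range at the half)
theorem pvRange_mul (m n : Nat) :
    List.range (m * n) = (List.range m).flatMap (fun i => (List.range n).map (fun j => i * n + j)) := by
  induction m with
  | zero => simp
  | succ m ih => rw [Nat.succ_mul, List.range_add, ih, List.range_succ, List.flatMap_append]; simp

-- the full mask enumeration splits into left and right half enumerations
theorem pvPatterns_split (u v : List Char) :
    (List.range (2 ^ (u ++ v).length)).map (fun (k : Nat) => (pvS (u ++ v) (k : Int)).1)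
      = (List.range (2 ^ u.length)).flatMap (fun (i : Nat) =>
          (List.range (2 ^ v.length)).map (fun (j : Nat) => (pvS u (i : Int)).1 ++ (pvS v (j : Int)).1)) := by
  rw [List.length_append, pow_add, pvRange_mul, List.map_flatMap]
  apply List.flatMap_congr
  intro i hi
  rw [List.mem_range] at hi
  rw [List.map_map]
  apply List.map_congr_left
  intro j hj
  rw [List.mem_range] at hj
  simp only [Function.comp_apply]
  rw [show ((i * 2 ^ v.length + j : Nat) : Int) = ((j + 2 ^ v.length * i : Nat) : Int) by
    push_cast; ring]
  rw [pvS_append, pvS_snd, pvS_fst_add]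
  have hdiv : (j + 2 ^ v.length * i) / 2 ^ v.length = j / 2 ^ v.length + i :=
    Nat.add_mul_div_left j i (Nat.two_pow_pos v.length)
  have hj0 : j / 2 ^ v.length = 0 := Nat.div_eq_of_lt hj
  rw [hdiv, hj0]
  simp

-- the two per-word loops agree on every starting dict
theorem pvInner_eq (d : PySem.Dict String Int) (word : String) :
    (extractAllPatterns word (PySem.Str.len word)).foldl (fun mDict p =>
        if mDict.contains p then mDict.modify p 0 (· + 1) else mDict.insert p 1) d
      = (let half := PySem.Int.floordiv (PySem.Str.len word) 2
         let left := pvMaskPatterns (PySem.Str.slice word none (some half))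
         let right := pvMaskPatterns (PySem.Str.slice word (some half) none)
         left.foldl (fun counts l =>
           right.foldl (fun counts r =>
             let p := l ++ r
             counts.insert p (counts.getD p 0 + 1)) counts) d) := by
  have hlenw : PySem.Str.len word = ((word.toList.length : Nat) : Int) := PySem.Str.len_eq word
  have hhalf : PySem.Int.floordiv (PySem.Str.len word) 2
      = ((word.toList.length / 2 : Nat) : Int) := by
    rw [hlenw]; exact_mod_cast PySem.Int.floordiv_natCast word.toList.length 2
  simp only [hhalf]
  -- the two halves of the word
  have hleft : (PySem.Str.slice word none (some ((word.toList.length / 2 : Nat) : Int))).toList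
      = word.toList.take (word.toList.length / 2) := by
    simp only [pysem]
  have hright : (PySem.Str.slice word (some ((word.toList.length / 2 : Nat) : Int)) none).toList
      = word.toList.drop (word.toList.length / 2) := by
    simp only [pysem]
  -- A's update step is B's
  have hstep : (fun (mDict : PySem.Dict String Int) (p : String) =>
        if mDict.contains p then mDict.modify p 0 (· + 1) else mDict.insert p 1)
      = (fun (mDict : PySem.Dict String Int) (p : String) =>
        mDict.insert p (mDict.getD p 0 + 1)) := by
    funext d p
    exact pvStep_eq d p
  rw [hstep]
  -- both sides as folds over mask-indexed pattern lists
  simp only [extractAllPatterns]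
  rw [pvKey, pvMaskPatterns_eq, pvMaskPatterns_eq, hleft, hright]
  set u := word.toList.take (word.toList.length / 2) with hu
  set v := word.toList.drop (word.toList.length / 2) with hv
  have huv : u ++ v = word.toList := List.take_append_drop _ _
  rw [← huv, pvPatterns_split u v]
  -- fold over a flatMap = the nested folds
  rw [List.map_flatMap, List.foldl_flatMap]
  simp only [List.map_map, List.foldl_map]
  congr 1
  funext acc i
  congr 1
  funext acc2 j
  simp [pysem]

theorem listToPatternDict2_eq (wordList : List String) :
    listToPatternDict2 wordList = listToPatternDict2_alt wordList := by
  unfold listToPatternDict2 listToPatternDict2_alt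
  have hfun : (fun (mDict : PySem.Dict String Int) (word : String) =>
      (extractAllPatterns word (PySem.Str.len word)).foldl (fun mDict p =>
        if mDict.contains p then mDict.modify p 0 (· + 1) else mDict.insert p 1) mDict)
    = (fun (counts : PySem.Dict String Int) (word : String) =>
      let half := PySem.Int.floordiv (PySem.Str.len word) 2
      let left := pvMaskPatterns (PySem.Str.slice word none (some half))
      let right := pvMaskPatterns (PySem.Str.slice word (some half) none)
      left.foldl (fun counts l =>
        right.foldl (fun counts r =>
          let p := l ++ r
          counts.insert p (counts.getD p 0 + 1)) counts) counts) := by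
    funext d word
    exact pvInner_eq d word
  rw [hfun]

-- ===== VERDICT (by name: the statement is the Claim_ definition above) =====
theorem listToPatternDict2_spec : Claim_equal_listToPatternDict2 := by
  intro wordList _
  unfold Spec_listToPatternDict2
  exact listToPatternDict2_eq wordList
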